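-- pv_equiv track=rewrite | github.com/hjwk/snipsapp-randomBoardgamePicker | action-bgc.py | GenerateBoardgamesAnswer
-- ===== SOURCE A (Python) =====
-- def GenerateBoardgamesAnswer(boardgames, num_players):
--     if len(boardgames) == 0:
--         return "Vous n'avez pas de jeu qui se joue à {}".format(num_players)
--
--     answer = "Vous pourriez jouer à "
--     for i in range(len(boardgames)):
--         answer += boardgames[i]
--         if i < len(boardgames) - 2:
--             answer += ", "
--         elif i == len(boardgames) - 2:
--             answer += " ou à "
--
--     return answer
-- ===== SOURCE B (Python) =====
-- def GenerateBoardgamesAnswer(boardgames, num_players):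
--     if not boardgames:
--         return "Vous n'avez pas de jeu qui se joue à {}".format(num_players)
--     if len(boardgames) == 1:
--         return "Vous pourriez jouer à " + boardgames[0]
--     return ("Vous pourriez jouer à " + ", ".join(boardgames[:-1])
--             + " ou à " + boardgames[-1])
-- ===== Notes on version B (the rewrite author's own statement) =====
-- stated objective: idiomatic
-- what changed: Replaces the index loop with per-position separator branching by a prefix/last split: ', '.join over boardgames[:-1] concatenated with ' ou a ' and the last element, with a length-1 special case.
import Mathlib
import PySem

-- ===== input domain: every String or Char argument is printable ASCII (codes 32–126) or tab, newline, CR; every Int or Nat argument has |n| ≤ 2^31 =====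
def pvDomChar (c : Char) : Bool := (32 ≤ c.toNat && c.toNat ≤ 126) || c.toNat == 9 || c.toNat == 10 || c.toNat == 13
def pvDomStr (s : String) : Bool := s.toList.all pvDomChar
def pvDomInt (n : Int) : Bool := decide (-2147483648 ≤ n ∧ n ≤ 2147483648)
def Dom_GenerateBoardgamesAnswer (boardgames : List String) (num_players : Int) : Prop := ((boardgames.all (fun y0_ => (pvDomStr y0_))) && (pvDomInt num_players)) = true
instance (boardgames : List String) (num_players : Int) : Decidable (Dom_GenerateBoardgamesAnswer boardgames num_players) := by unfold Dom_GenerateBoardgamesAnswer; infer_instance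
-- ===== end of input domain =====

-- B replaces A's index loop (separator chosen by position) with a ", ".join of all but
-- the last game plus one concatenation of " ou à " and the last game (idiomatic; same cost).

-- ===== PORT A =====
-- index loop 'for i in range(len(boardgames))'; boardgames[i] is always in range here,
-- so PySem.List.pyGetD is exact (Python never raises in this loop)
def GenerateBoardgamesAnswer (boardgames : List String) (num_players : Int) : String :=
  if boardgames.length = 0 then
    "Vous n'avez pas de jeu qui se joue à " ++ PySem.Int.toStr num_players
  else
    (PySem.List.pyRange 0 (boardgames.length : Int) 1).foldl
      (fun answer i =>
        let answer := answer ++ PySem.List.pyGetD boardgames i ""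
        if i < (boardgames.length : Int) - 2 then answer ++ ", "
        else if i = (boardgames.length : Int) - 2 then answer ++ " ou à "
        else answer)
      "Vous pourriez jouer à "

-- ===== PORT B =====
-- boardgames[0] and boardgames[-1] are taken on a list known nonempty, so pyGetD is exact
def GenerateBoardgamesAnswer_alt (boardgames : List String) (num_players : Int) : String :=
  if boardgames.isEmpty then
    "Vous n'avez pas de jeu qui se joue à " ++ PySem.Int.toStr num_players
  else if boardgames.length = 1 then
    "Vous pourriez jouer à " ++ PySem.List.pyGetD boardgames 0 ""
  else
    "Vous pourriez jouer à "
      ++ PySem.Str.join ", " (PySem.List.slice boardgames none (some (-1)))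
      ++ " ou à " ++ PySem.List.pyGetD boardgames (-1) ""

-- ===== PRECONDITION & SPEC =====
def Spec_GenerateBoardgamesAnswer (boardgames : List String) (num_players : Int) (out : String) : Prop := out = GenerateBoardgamesAnswer_alt boardgames num_players
instance (boardgames : List String) (num_players : Int) (out : String) : Decidable (Spec_GenerateBoardgamesAnswer boardgames num_players out) := by unfold Spec_GenerateBoardgamesAnswer; infer_instance

-- ===== CLAIM (what is proved, stated in full; the proofs are below) =====
def Claim_equal_GenerateBoardgamesAnswer : Prop := ∀ (boardgames : List String) (num_players : Int), Dom_GenerateBoardgamesAnswer boardgames num_players → Spec_GenerateBoardgamesAnswer boardgames num_players (GenerateBoardgamesAnswer boardgames num_players)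

-- ===== LEMMAS AND PROOFS =====

-- canonical rendering of the game list: separator chosen by how many games remain
def pvRender : List String → String
  | [] => ""
  | [x] => x
  | x :: xs => x ++ (if xs.length = 1 then " ou à " else ", ") ++ pvRender xs

theorem pvGetD_cons_succ (x : String) (xs : List String) (k : Nat) (d : String) :
    PySem.List.pyGetD (x :: xs) ((k : Int) + 1) d = PySem.List.pyGetD xs (k : Int) d := by
  have h : ((k : Int) + 1) = ((k + 1 : Nat) : Int) := by push_cast; ring
  rw [h, PySem.List.pyGetD_natCast, PySem.List.pyGetD_natCast]; rfl

-- A's loop, written over List.range, equals the canonical rendering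
theorem pvLoop_eq_render (bs : List String) (acc : String) :
    (List.range bs.length).foldl
      (fun (answer : String) (k : Nat) =>
        (if (k : Int) < (bs.length : Int) - 2 then
          (answer ++ PySem.List.pyGetD bs (k : Int) "") ++ ", "
        else if (k : Int) = (bs.length : Int) - 2 then
          (answer ++ PySem.List.pyGetD bs (k : Int) "") ++ " ou à "
        else answer ++ PySem.List.pyGetD bs (k : Int) "")) acc
    = acc ++ pvRender bs := by
  induction bs generalizing acc with
  | nil => simp [pvRender]
  | cons x xs ih =>
    rw [List.length_cons, List.range_succ_eq_map, List.foldl_cons, List.foldl_map]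
    have hstep : ∀ (a : String) (k : Nat),
        (if ((k+1 : Nat) : Int) < ((xs.length + 1 : Nat) : Int) - 2 then
          (a ++ PySem.List.pyGetD (x :: xs) ((k+1 : Nat) : Int) "") ++ ", "
        else if ((k+1 : Nat) : Int) = ((xs.length + 1 : Nat) : Int) - 2 then
          (a ++ PySem.List.pyGetD (x :: xs) ((k+1 : Nat) : Int) "") ++ " ou à "
        else a ++ PySem.List.pyGetD (x :: xs) ((k+1 : Nat) : Int) "")
        = (if (k : Int) < (xs.length : Int) - 2 then
            (a ++ PySem.List.pyGetD xs (k : Int) "") ++ ", "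
          else if (k : Int) = (xs.length : Int) - 2 then
            (a ++ PySem.List.pyGetD xs (k : Int) "") ++ " ou à "
          else a ++ PySem.List.pyGetD xs (k : Int) "") := by
      intro a k
      have hg : PySem.List.pyGetD (x :: xs) ((k+1 : Nat) : Int) ""
          = PySem.List.pyGetD xs (k : Int) "" := by
        have : ((k + 1 : Nat) : Int) = (k : Int) + 1 := by push_cast; ring
        rw [this, pvGetD_cons_succ]
      have h1 : (((k+1 : Nat) : Int) < ((xs.length + 1 : Nat) : Int) - 2)
          ↔ ((k : Int) < (xs.length : Int) - 2) := by push_cast; omega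
      have h2 : (((k+1 : Nat) : Int) = ((xs.length + 1 : Nat) : Int) - 2)
          ↔ ((k : Int) = (xs.length : Int) - 2) := by push_cast; omega
      rw [hg]; simp only [h1, h2]
    have hfun :
        (fun (a : String) (k : Nat) =>
            (if ((k+1 : Nat) : Int) < ((xs.length + 1 : Nat) : Int) - 2 then
              (a ++ PySem.List.pyGetD (x :: xs) ((k+1 : Nat) : Int) "") ++ ", "
            else if ((k+1 : Nat) : Int) = ((xs.length + 1 : Nat) : Int) - 2 then
              (a ++ PySem.List.pyGetD (x :: xs) ((k+1 : Nat) : Int) "") ++ " ou à "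
            else a ++ PySem.List.pyGetD (x :: xs) ((k+1 : Nat) : Int) ""))
        = (fun (a : String) (k : Nat) =>
            (if (k : Int) < (xs.length : Int) - 2 then
              (a ++ PySem.List.pyGetD xs (k : Int) "") ++ ", "
            else if (k : Int) = (xs.length : Int) - 2 then
              (a ++ PySem.List.pyGetD xs (k : Int) "") ++ " ou à "
            else a ++ PySem.List.pyGetD xs (k : Int) "")) := by
      funext a k; exact hstep a k
    rw [hfun, ih]
    rcases xs with _ | ⟨y, ys⟩
    · simp [pvRender]
    · rcases ys with _ | ⟨z, zs⟩
      · simp [pvRender, String.append_assoc]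
      · have hc : ((0 : Nat) : Int) < (((y :: z :: zs).length + 1 : Nat) : Int) - 2 := by
          push_cast; simp; omega
        simp only [if_pos hc]
        simp [pvRender, String.append_assoc]

theorem pvStrJoin_singleton (sep p : String) : PySem.Str.join sep [p] = p := by
  apply String.toList_inj.mp
  simp [PySem.Str.toList_join, PySem.Chars.join_singleton]

theorem pvStrJoin_cons_cons (sep p q : String) (rest : List String) :
    PySem.Str.join sep (p :: q :: rest) = p ++ sep ++ PySem.Str.join sep (q :: rest) := by
  apply String.toList_inj.mp
  simp [PySem.Str.toList_join, PySem.Chars.join_cons_cons]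

theorem pvGetD_neg_one (x : String) (xs : List String) :
    PySem.List.pyGetD (x :: xs) (-1) "" = (x :: xs).getLast (by simp) := by
  simp [PySem.List.pyGetD, PySem.List.pyGet?, PySem.List.pyIdx?, List.getLast_eq_getElem]
  rfl

theorem pvRender_join (x y : String) (xs : List String) :
    pvRender (x :: y :: xs)
      = PySem.Str.join ", " ((x :: y :: xs).dropLast) ++ " ou à "
          ++ PySem.List.pyGetD (x :: y :: xs) (-1) "" := by
  rw [pvGetD_neg_one]
  induction xs generalizing x y with
  | nil => simp [pvRender, pvStrJoin_singleton, String.append_assoc]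
  | cons z zs ih =>
    have h := ih y z
    rw [List.getLast_cons (by simp), List.dropLast_cons_of_ne_nil (by simp),
      show (y :: z :: zs).dropLast = y :: (z :: zs).dropLast from
        List.dropLast_cons_of_ne_nil (by simp), pvStrJoin_cons_cons]
    rw [show (y :: z :: zs).dropLast = y :: (z :: zs).dropLast from
        List.dropLast_cons_of_ne_nil (by simp)] at h
    rw [show pvRender (x :: y :: z :: zs)
        = x ++ (if (y :: z :: zs).length = 1 then " ou à " else ", ")
            ++ pvRender (y :: z :: zs) from rfl]
    rw [if_neg (by simp), h]
    simp [String.append_assoc]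

theorem pvA_render (x : String) (xs : List String) (n : Int) :
    GenerateBoardgamesAnswer (x :: xs) n = "Vous pourriez jouer à " ++ pvRender (x :: xs) := by
  unfold GenerateBoardgamesAnswer
  rw [if_neg (by simp)]
  rw [PySem.List.pyRange_one]
  simp only [Int.sub_zero, Int.toNat_natCast, zero_add, List.foldl_map]
  exact pvLoop_eq_render (x :: xs) _

theorem GenerateBoardgamesAnswer_spec : Claim_equal_GenerateBoardgamesAnswer := by
  intro bs n _
  unfold Spec_GenerateBoardgamesAnswer
  rcases bs with _ | ⟨x, xs⟩
  · rfl
  · rw [pvA_render]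
    unfold GenerateBoardgamesAnswer_alt
    rw [if_neg (by simp)]
    rcases xs with _ | ⟨y, ys⟩
    · rw [if_pos (by simp)]
      simp [pvRender, PySem.List.pyGetD, PySem.List.pyGet?, PySem.List.pyIdx?]
    · rw [if_neg (by simp)]
      rw [PySem.List.slice_to_neg_one, pvRender_join]
      simp [String.append_assoc]
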